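-- pv_equiv track=rewrite | github.com/colinpearse/django-stuff | lib/verbose.py | splitLevelsStr
-- ===== SOURCE A (Python) =====
-- def splitLevelsStr(levels,separator=','):
--     strlevels = levels.split(separator)
--     numlevels = [n for n in strlevels if n.isdigit() is True]
--     strlevels = [n for n in strlevels if n.isdigit() is False]
--     if numlevels == []:
--         numlevel = None
--     else:
--         numlevels = map(int,numlevels)
--         numlevel = max(numlevels)
--     return numlevel,strlevels
-- ===== SOURCE B (Python) =====
-- def splitLevelsStr(levels, separator=','):
--     def go(toks):
--         if not toks:
--             return [], []
--         nums, strs = go(toks[1:])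
--         tok = toks[0]
--         if tok.isdigit():
--             return [int(tok)] + nums, strs
--         return nums, [tok] + strs
--     nums, strs = go(levels.split(separator))
--     if nums:
--         return sorted(nums)[-1], strs
--     return None, strs
-- ===== Notes on version B (the rewrite author's own statement) =====
-- stated objective: alternative
-- what changed: Replaced the two filtering comprehensions and the max() reduction by a structural recursion that partitions the tokens back-to-front into an int list and a string list, and obtains the maximum by sorting the numeric values and taking the last element.
import Mathlib
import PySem

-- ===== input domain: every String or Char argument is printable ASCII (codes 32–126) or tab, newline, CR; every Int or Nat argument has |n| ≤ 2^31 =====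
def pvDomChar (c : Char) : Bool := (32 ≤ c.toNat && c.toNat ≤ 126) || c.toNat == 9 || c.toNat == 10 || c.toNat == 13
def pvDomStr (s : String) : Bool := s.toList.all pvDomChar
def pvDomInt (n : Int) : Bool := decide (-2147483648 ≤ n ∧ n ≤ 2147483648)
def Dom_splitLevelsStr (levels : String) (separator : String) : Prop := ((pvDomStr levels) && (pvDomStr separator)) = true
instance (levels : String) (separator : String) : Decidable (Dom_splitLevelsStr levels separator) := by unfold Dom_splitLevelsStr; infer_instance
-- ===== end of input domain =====

-- B replaces the comprehensions+max() staging of A by a structural recursion that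
-- partitions the tokens back-to-front and takes the maximum as sorted(nums)[-1] (objective: alternative).

-- ===== PORT A =====
-- int(n) on a token that passed isdigit always succeeds; getD 0 is unreachable (exact on Dom/Pre_).
def splitLevelsStr (levels : String) (separator : String) : Option Int × List String :=
  let strlevels0 := (PySem.Str.split? levels separator).getD []
  let numlevels := strlevels0.filter (fun n => PySem.Str.strIsdigit n)
  let strlevels := strlevels0.filter (fun n => !PySem.Str.strIsdigit n)
  if numlevels = [] then
    (none, strlevels)
  else
    let nums := numlevels.map (fun n => (PySem.Int.ofStr? n).getD 0)
    (PySem.List.max? nums (fun x => x), strlevels)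

-- ===== PORT B =====
-- recursive partition of the tokens, exactly Source B's inner go()
def pvGo (toks : List String) : List Int × List String :=
  match toks with
  | [] => ([], [])
  | tok :: rest =>
    let p := pvGo rest
    if PySem.Str.strIsdigit tok then ((PySem.Int.ofStr? tok).getD 0 :: p.1, p.2)
    else (p.1, tok :: p.2)

-- sorted(nums)[-1]: pyGet? is xs[-1]; it is some exactly because nums ≠ [] in that branch
def splitLevelsStr_alt (levels : String) (separator : String) : Option Int × List String :=
  let p := pvGo ((PySem.Str.split? levels separator).getD [])
  if p.1 = [] then (none, p.2)
  else (PySem.List.pyGet? (PySem.List.sorted p.1 (fun x => x) false) (-1), p.2)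

-- ===== PRECONDITION & SPEC =====
-- Pre_ excludes an empty separator only: Python str.split raises ValueError there (in A and in B alike).
def Pre_splitLevelsStr (levels : String) (separator : String) : Prop := separator ≠ ""
instance (levels : String) (separator : String) : Decidable (Pre_splitLevelsStr levels separator) := by unfold Pre_splitLevelsStr; infer_instance
def pvWitness_splitLevelsStr : String × String := ("3,foo,12,bar", ",")

def Spec_splitLevelsStr (levels : String) (separator : String) (out : Option Int × List String) : Prop := out = splitLevelsStr_alt levels separator
instance (levels : String) (separator : String) (out : Option Int × List String) : Decidable (Spec_splitLevelsStr levels separator out) := by unfold Spec_splitLevelsStr; infer_instance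

-- ===== CLAIM =====
def Claim_equal_splitLevelsStr : Prop := ∀ (levels : String) (separator : String), Dom_splitLevelsStr levels separator → Pre_splitLevelsStr levels separator → Spec_splitLevelsStr levels separator (splitLevelsStr levels separator)

-- ===== LEMMAS AND PROOFS =====

-- pvGo is the pair of A's two filtered lists (nums already converted)
theorem pvGo_eq (toks : List String) :
    pvGo toks = ((toks.filter (fun n => PySem.Str.strIsdigit n)).map (fun n => (PySem.Int.ofStr? n).getD 0),
                 toks.filter (fun n => !PySem.Str.strIsdigit n)) := by
  induction toks with
  | nil => rfl
  | cons t ts ih =>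
    by_cases h : PySem.Chars.strIsdigit t.toList
    · simp [pvGo, h, ih]
    · simp [pvGo, h, ih]

-- sorted(nums)[-1] is max(nums), for nonempty nums
theorem pyGet_sorted_neg_one_eq_max? (nums : List Int) (h : nums ≠ []) :
    PySem.List.pyGet? (PySem.List.sorted nums (fun x => x) false) (-1)
      = PySem.List.max? nums (fun x => x) := by
  obtain ⟨a, t, rfl⟩ := List.exists_cons_of_ne_nil h
  rw [PySem.List.pyGet?_neg_one, PySem.List.max?_id_cons]
  have hsne : PySem.List.sorted (a :: t) (fun x : Int => x) false ≠ [] := by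
    rw [Ne, PySem.List.sorted_eq_nil_iff]; simp
  have hlen : 0 < (PySem.List.sorted (a :: t) (fun x : Int => x) false).length :=
    List.length_pos_of_ne_nil hsne
  rw [List.getLast?_eq_some_getLast hsne]
  congr 1
  have hperm : (PySem.List.sorted (a :: t) (fun x : Int => x) false).Perm (a :: t) :=
    PySem.List.sorted_perm _ _ _
  -- the last element of the sorted list bounds every member of (a :: t)
  have hbound : ∀ y ∈ (a :: t),
      y ≤ (PySem.List.sorted (a :: t) (fun x : Int => x) false).getLast hsne := by
    intro y hy
    obtain ⟨p, hp, hyp⟩ := List.mem_iff_getElem.mp (hperm.mem_iff.mpr hy)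
    rw [List.getLast_eq_getElem]
    calc y = (PySem.List.sorted (a :: t) (fun x : Int => x) false)[p] := hyp.symm
      _ ≤ _ := PySem.List.sorted_id_getElem_mono (xs := a :: t) (p := p)
          (q := (PySem.List.sorted (a :: t) (fun x : Int => x) false).length - 1)
          (by omega) (by omega)
  -- the running max is a member and bounds every member
  have hM := PySem.List.le_foldl_max t a
  have hMmem : t.foldl max a ∈ (a :: t) := by
    rcases PySem.List.foldl_max_mem t a with h1 | h1
    · rw [h1]; exact List.mem_cons_self
    · exact List.mem_cons_of_mem _ h1
  have hlastmem : (PySem.List.sorted (a :: t) (fun x : Int => x) false).getLast hsne ∈ (a :: t) :=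
    hperm.mem_iff.mp (List.getLast_mem hsne)
  have h1 : (PySem.List.sorted (a :: t) (fun x : Int => x) false).getLast hsne ≤ t.foldl max a := by
    rcases List.mem_cons.mp hlastmem with h2 | h2
    · rw [h2]; exact hM.1
    · exact hM.2 _ h2
  have h2 : t.foldl max a ≤ (PySem.List.sorted (a :: t) (fun x : Int => x) false).getLast hsne :=
    hbound _ hMmem
  omega

-- ===== VERDICT =====
theorem splitLevelsStr_spec : Claim_equal_splitLevelsStr := by
  intro levels separator _ _
  unfold Spec_splitLevelsStr splitLevelsStr splitLevelsStr_alt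
  rw [pvGo_eq]
  set toks := (PySem.Str.split? levels separator).getD [] with htoks
  dsimp only
  have hmap : (toks.filter (fun n => PySem.Str.strIsdigit n)).map
      (fun n => (PySem.Int.ofStr? n).getD 0) = []
      ↔ toks.filter (fun n => PySem.Str.strIsdigit n) = [] := by
    simp
  by_cases h : toks.filter (fun n => PySem.Str.strIsdigit n) = []
  · rw [if_pos h, if_pos (hmap.mpr h)]
  · rw [if_neg h, if_neg (fun hc => h (hmap.mp hc)),
      pyGet_sorted_neg_one_eq_max? _ (fun hc => h (hmap.mp hc))]
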